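-- pv_equiv track=rewrite | github.com/JaehyoJJAng/Algorithm | cos-pro-2/04_학점 계산.py | solution
-- ===== SOURCE A (Python) =====
-- from typing import List
--
-- def solution(scores: List[int]) -> int:
--     """
--     grade_counter[0] : A
--     grade_counter[1] : B
--     grade_counter[2] : C
--     grade_counter[3] : D
--     grade_counter[4] : F
--     """
--     grade_counter : List[int] = [0 for i in range(5)]
--     for x in scores:
--         if 85 <= x <= 100:
--             grade_counter[0] += 1
--         elif 70 <= x <= 84:
--             grade_counter[1] += 1
--         elif 55 <= x <= 69:
--             grade_counter[2] += 1
--         elif 40 <= x <= 54: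
--             grade_counter[3] += 1
--         else:
--             grade_counter[4] += 1
--     return grade_counter
-- ===== SOURCE B (Python) =====
-- from typing import List
--
-- def solution(scores: List[int]) -> List[int]:
--     a = sum(1 for x in scores if 85 <= x <= 100)
--     b = sum(1 for x in scores if 70 <= x <= 84)
--     c = sum(1 for x in scores if 55 <= x <= 69)
--     d = sum(1 for x in scores if 40 <= x <= 54)
--     return [a, b, c, d, len(scores) - a - b - c - d]
-- ===== Notes on version B (the rewrite author's own statement) =====
-- stated objective: alternative
-- what changed: Replaces A's single pass that dispatches each score into a mutable 5-bucket array by four independent counting passes (one per letter grade A-D) with the F count derived by subtraction from the list length; correctness rests on the four ranges being disjoint, so F = everything else.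
import Mathlib
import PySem

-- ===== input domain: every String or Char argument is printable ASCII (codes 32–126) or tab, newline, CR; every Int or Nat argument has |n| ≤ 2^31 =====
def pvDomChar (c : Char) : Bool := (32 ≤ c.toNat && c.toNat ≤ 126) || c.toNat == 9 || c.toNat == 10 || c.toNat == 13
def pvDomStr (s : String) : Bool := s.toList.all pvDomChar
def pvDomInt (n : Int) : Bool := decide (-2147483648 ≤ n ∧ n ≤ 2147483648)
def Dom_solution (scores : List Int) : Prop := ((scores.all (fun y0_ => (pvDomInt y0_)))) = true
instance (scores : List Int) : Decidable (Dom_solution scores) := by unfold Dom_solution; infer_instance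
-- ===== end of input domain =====

-- B replaces A's single pass over a mutable 5-bucket array by four independent
-- counting passes (grades A–D) with F obtained by subtraction from the length.

-- ===== PORT A =====
-- one iteration of A's loop body: the if/elif chain bumping the matching bucket
def stepA (g : List Int) (x : Int) : List Int :=
  if 85 ≤ x ∧ x ≤ 100 then g.set 0 (g.getD 0 0 + 1)
  else if 70 ≤ x ∧ x ≤ 84 then g.set 1 (g.getD 1 0 + 1)
  else if 55 ≤ x ∧ x ≤ 69 then g.set 2 (g.getD 2 0 + 1)
  else if 40 ≤ x ∧ x ≤ 54 then g.set 3 (g.getD 3 0 + 1)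
  else g.set 4 (g.getD 4 0 + 1)

def solution (scores : List Int) : List Int :=
  scores.foldl stepA [0, 0, 0, 0, 0]

-- ===== PORT B =====
-- sum(1 for x in scores if p(x))  →  countP, cast to Int
def cntB (scores : List Int) (p : Int → Bool) : Int := (scores.countP p : Int)

def solution_alt (scores : List Int) : List Int :=
  let a := cntB scores (fun x => 85 ≤ x ∧ x ≤ 100)
  let b := cntB scores (fun x => 70 ≤ x ∧ x ≤ 84)
  let c := cntB scores (fun x => 55 ≤ x ∧ x ≤ 69)
  let d := cntB scores (fun x => 40 ≤ x ∧ x ≤ 54)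
  [a, b, c, d, (scores.length : Int) - a - b - c - d]

-- ===== PRECONDITION & SPEC =====
def Spec_solution (scores : List Int) (out : List Int) : Prop := out = solution_alt scores
instance (scores : List Int) (out : List Int) : Decidable (Spec_solution scores out) := by unfold Spec_solution; infer_instance

-- ===== CLAIM (what is proved, stated in full; the proofs are below) =====
def Claim_equal_solution : Prop := ∀ (scores : List Int), Dom_solution scores → Spec_solution scores (solution scores)

-- ===== LEMMAS AND PROOFS =====
-- A's fold adds, to each starting bucket, the count of scores in that range
-- (with bucket 4 collecting everything outside the four ranges).
theorem foldA_char : ∀ (xs : List Int) (g0 g1 g2 g3 g4 : Int),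
    xs.foldl stepA [g0, g1, g2, g3, g4] =
      [g0 + cntB xs (fun x => 85 ≤ x ∧ x ≤ 100),
       g1 + cntB xs (fun x => 70 ≤ x ∧ x ≤ 84),
       g2 + cntB xs (fun x => 55 ≤ x ∧ x ≤ 69),
       g3 + cntB xs (fun x => 40 ≤ x ∧ x ≤ 54),
       g4 + cntB xs (fun x => ¬(85 ≤ x ∧ x ≤ 100) ∧ ¬(70 ≤ x ∧ x ≤ 84) ∧
                               ¬(55 ≤ x ∧ x ≤ 69) ∧ ¬(40 ≤ x ∧ x ≤ 54))] := by
  intro xs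
  induction xs with
  | nil => intro g0 g1 g2 g3 g4; simp [cntB]
  | cons x xs ih =>
      intro g0 g1 g2 g3 g4
      simp only [List.foldl_cons, stepA]
      split_ifs with h1 h2 h3 h4 <;>
        simp_all [cntB, List.countP_cons, List.set, List.getD] <;> omega

-- pushing cntB through a cons, with the Bool test turned into an if
theorem cntB_cons (p : Int → Bool) (x : Int) (xs : List Int) :
    cntB (x :: xs) p = cntB xs p + (if p x then 1 else 0) := by
  by_cases h : p x <;> simp [cntB, h]

-- the four ranges are disjoint, so the leftover count is length minus the rest
theorem cnt_partition (xs : List Int) :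
    cntB xs (fun x => ¬(85 ≤ x ∧ x ≤ 100) ∧ ¬(70 ≤ x ∧ x ≤ 84) ∧
                      ¬(55 ≤ x ∧ x ≤ 69) ∧ ¬(40 ≤ x ∧ x ≤ 54)) =
    (xs.length : Int) - cntB xs (fun x => 85 ≤ x ∧ x ≤ 100)
      - cntB xs (fun x => 70 ≤ x ∧ x ≤ 84)
      - cntB xs (fun x => 55 ≤ x ∧ x ≤ 69)
      - cntB xs (fun x => 40 ≤ x ∧ x ≤ 54) := by
  induction xs with
  | nil => simp [cntB]
  | cons x xs ih =>
      rw [cntB_cons, cntB_cons, cntB_cons, cntB_cons, cntB_cons, List.length_cons]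
      simp only [decide_eq_true_eq]
      push_cast
      split_ifs <;> omega

-- ===== VERDICT (by name: the statement is the Claim_ definition above) =====
theorem solution_spec : Claim_equal_solution := by
  intro scores _
  unfold Spec_solution solution solution_alt
  rw [foldA_char, cnt_partition]
  simp
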